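-- pv_equiv track=rewrite | github.com/thiagofernandes1987-create/APEX | algorithms/uco-sensor/sensor-api/metrics/architecture_analyzer.py | _module_layer
-- ===== SOURCE A (Python) =====
-- from typing import Dict, FrozenSet, Iterator, List, Optional, Set, Tuple
--
-- _LAYER_MAP: List[Tuple[int, FrozenSet[str]]] = [
--     (3, frozenset({"api", "endpoint", "route", "controller", "view", "handler", "router"})),
--     (2, frozenset({"app", "application", "use_case", "usecase", "service", "interactor"})),
--     (1, frozenset({"domain", "entity", "model", "aggregate", "value_object", "valueobject"})),
--     (0, frozenset({"infra", "infrastructure", "repository", "repo", "db", "database",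
--                    "storage", "persistence", "adapter", "gateway"})),
-- ]
--
-- def _module_layer(module_name: str) -> Optional[int]:
--     """
--     Return the architecture layer index [0–3] for *module_name*, or ``None``
--     if the module name doesn't match any known layer keyword.
--
--     Detection uses both dot-separated parts and underscore-split tokens.
--     """
--     name_lower = module_name.lower()
--     parts: Set[str] = set()
--     # Dot-separated parts (e.g. "infra.db" → {"infra", "db"})
--     parts.update(name_lower.split("."))
--     # Underscore-split tokens within each part
--     for part in list(parts):
--         parts.update(part.split("_"))
--
--     for layer_idx, keywords in _LAYER_MAP:
--         if parts & keywords: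
--             return layer_idx
--     return None
-- ===== SOURCE B (Python) =====
-- from typing import Dict, Optional
--
-- # Flat keyword -> layer-index table (the four layer keyword sets are disjoint,
-- # and A's priority order is exactly descending layer index, so a running max works).
-- _KEYWORD_LAYER: Dict[str, int] = {
--     "api": 3, "endpoint": 3, "route": 3, "controller": 3, "view": 3, "handler": 3, "router": 3,
--     "app": 2, "application": 2, "use_case": 2, "usecase": 2, "service": 2, "interactor": 2,
--     "domain": 1, "entity": 1, "model": 1, "aggregate": 1, "value_object": 1, "valueobject": 1,
--     "infra": 0, "infrastructure": 0, "repository": 0, "repo": 0, "db": 0, "database": 0,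
--     "storage": 0, "persistence": 0, "adapter": 0, "gateway": 0,
-- }
--
-- def _module_layer(module_name: str) -> Optional[int]:
--     best: Optional[int] = None
--     for part in module_name.lower().split("."):
--         for tok in [part] + part.split("_"):
--             idx = _KEYWORD_LAYER.get(tok)
--             if idx is not None and (best is None or best < idx):
--                 best = idx
--     return best
-- ===== Notes on version B (the rewrite author's own statement) =====
-- stated objective: simpler
-- what changed: A intersects the token set with each of four layer keyword frozensets in priority order; B flattens the disjoint keyword sets into one keyword->layer-index dict and makes a single pass over the tokens keeping a running maximum index (priority order equals descending index), returning None when nothing matched.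
import Mathlib
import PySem

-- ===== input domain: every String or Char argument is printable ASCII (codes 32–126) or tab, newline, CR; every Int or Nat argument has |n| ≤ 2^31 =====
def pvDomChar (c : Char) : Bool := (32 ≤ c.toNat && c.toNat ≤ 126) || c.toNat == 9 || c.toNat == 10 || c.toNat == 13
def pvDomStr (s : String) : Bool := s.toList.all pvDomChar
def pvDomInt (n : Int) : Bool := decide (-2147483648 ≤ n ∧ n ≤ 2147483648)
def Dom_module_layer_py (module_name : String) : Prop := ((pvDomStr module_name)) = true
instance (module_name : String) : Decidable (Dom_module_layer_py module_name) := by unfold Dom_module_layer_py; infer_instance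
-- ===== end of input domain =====

-- B replaces A's layer-by-layer set-intersection scan with a flat keyword→index dict and a
-- single running-max pass over the tokens (simpler; same observable behaviour).

-- ===== PORT A =====
-- s.split(".") / s.split("_"): the separator is a nonempty literal, so split? is always some
def pvDot (s : String) : List String := (PySem.Str.split? s ".").getD []
def pvUnd (s : String) : List String := (PySem.Str.split? s "_").getD []

def pvK3 : List String := ["api", "endpoint", "route", "controller", "view", "handler", "router"]
def pvK2 : List String := ["app", "application", "use_case", "usecase", "service", "interactor"]
def pvK1 : List String := ["domain", "entity", "model", "aggregate", "value_object", "valueobject"]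
def pvK0 : List String := ["infra", "infrastructure", "repository", "repo", "db", "database",
                           "storage", "persistence", "adapter", "gateway"]

def pvLayerMap : List (Int × List String) := [(3, pvK3), (2, pvK2), (1, pvK1), (0, pvK0)]

-- the 'for layer_idx, keywords in _LAYER_MAP: if parts & keywords: return layer_idx' loop
def pvFindLayer (parts : PySem.Set String) : List (Int × List String) → Option Int
  | [] => none
  | (i, kws) :: rest =>
      if (PySem.Set.inter parts (PySem.Set.ofList kws)).isEmpty then pvFindLayer parts rest
      else some i

def module_layer_py (module_name : String) : Option Int :=
  let nameLower := PySem.Str.lower module_name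
  let parts0 : PySem.Set String := PySem.Set.ofList (pvDot nameLower)
  -- 'for part in list(parts): parts.update(part.split("_"))' — only the final set's
  -- MEMBERSHIP is consumed below, so folding in the stored order is order-independent-exact
  let parts : PySem.Set String :=
    parts0.foldl (fun s p => PySem.Set.update s (pvUnd p)) parts0
  pvFindLayer parts pvLayerMap

-- ===== PORT B =====
def pvKwList : List (String × Int) :=
  [("api", 3), ("endpoint", 3), ("route", 3), ("controller", 3), ("view", 3), ("handler", 3), ("router", 3),
   ("app", 2), ("application", 2), ("use_case", 2), ("usecase", 2), ("service", 2), ("interactor", 2),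
   ("domain", 1), ("entity", 1), ("model", 1), ("aggregate", 1), ("value_object", 1), ("valueobject", 1),
   ("infra", 0), ("infrastructure", 0), ("repository", 0), ("repo", 0), ("db", 0), ("database", 0),
   ("storage", 0), ("persistence", 0), ("adapter", 0), ("gateway", 0)]

def pvKw : PySem.Dict String Int := PySem.Dict.ofList pvKwList

def module_layer_py_alt (module_name : String) : Option Int :=
  (pvDot (PySem.Str.lower module_name)).foldl
    (fun best part =>
      (part :: pvUnd part).foldl
        (fun best tok =>
          match pvKw.get? tok with
          | none => best
          | some i =>
            match best with
            | none => some i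
            | some b => if b < i then some i else best) best) none

-- ===== PRECONDITION & SPEC =====
def Spec_module_layer_py (module_name : String) (out : Option Int) : Prop := out = module_layer_py_alt module_name
instance (module_name : String) (out : Option Int) : Decidable (Spec_module_layer_py module_name out) := by unfold Spec_module_layer_py; infer_instance

-- ===== CLAIM (what is proved, stated in full; the proofs are below) =====
def Claim_equal_module_layer_py : Prop := ∀ (module_name : String), Dom_module_layer_py module_name → Spec_module_layer_py module_name (module_layer_py module_name)

-- ===== LEMMAS AND PROOFS =====

-- the token list B traverses
def pvTokens (nl : String) : List String := (pvDot nl).flatMap (fun p => p :: pvUnd p)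

-- the matched layer indices, in token order
def pvM (nl : String) : List Int := (pvTokens nl).filterMap pvKw.get?

-- A's final parts set
def pvParts (nl : String) : PySem.Set String :=
  (PySem.Set.ofList (pvDot nl)).foldl (fun s p => PySem.Set.update s (pvUnd p))
    (PySem.Set.ofList (pvDot nl))

-- the inner step of B's fold
def pvStep (best : Option Int) (tok : String) : Option Int :=
  match pvKw.get? tok with
  | none => best
  | some i =>
    match best with
    | none => some i
    | some b => if b < i then some i else best

def pvMStep (best : Option Int) (i : Int) : Option Int :=
  match best with
  | none => some i
  | some b => if b < i then some i else best

-- first-match lookup in a literal dict only returns stored pairs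
lemma pvGet_mk_mem {κ ν : Type} [BEq κ] [LawfulBEq κ] (pairs : List (κ × ν)) (t : κ) (i : ν)
    (h : (PySem.Dict.mk pairs).get? t = some i) : (t, i) ∈ pairs := by
  induction pairs with
  | nil => simp [PySem.Dict.get?] at h
  | cons p rest ih =>
    obtain ⟨k, v⟩ := p
    rw [PySem.Dict.get?_mk_cons] at h
    by_cases hk : (k == t) = true
    · rw [if_pos hk] at h
      obtain rfl := eq_of_beq hk
      cases h
      exact List.mem_cons_self
    · rw [if_neg hk] at h
      exact List.mem_cons_of_mem _ (ih h)

lemma pvGet_mem (t : String) (i : Int) (h : pvKw.get? t = some i) : (t, i) ∈ pvKwList := by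
  have hmk : pvKw = PySem.Dict.mk pvKwList := rfl
  rw [hmk] at h
  exact pvGet_mk_mem pvKwList t i h

-- membership in A's final parts set = membership in B's token list
lemma pvMem_parts (nl : String) (x : String) : x ∈ pvParts nl ↔ x ∈ pvTokens nl := by
  have gen : ∀ (l : List String) (s : PySem.Set String),
      x ∈ l.foldl (fun s p => PySem.Set.update s (pvUnd p)) s ↔
        x ∈ s ∨ ∃ p ∈ l, x ∈ pvUnd p := by
    intro l
    induction l with
    | nil => simp
    | cons a l ih =>
      intro s
      simp only [List.foldl_cons, ih, PySem.Set.mem_update, List.mem_cons]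
      constructor
      · rintro (⟨h | h⟩ | ⟨p, hp, hx⟩)
        · exact Or.inl h
        · exact Or.inr ⟨a, Or.inl rfl, h⟩
        · exact Or.inr ⟨p, Or.inr hp, hx⟩
      · rintro (h | ⟨p, rfl | hp, hx⟩)
        · exact Or.inl (Or.inl h)
        · exact Or.inl (Or.inr hx)
        · exact Or.inr ⟨p, hp, hx⟩
  unfold pvParts
  rw [gen]
  simp only [PySem.Set.mem_ofList, pvTokens, List.mem_flatMap, List.mem_cons]
  constructor
  · rintro (h | ⟨p, hp, hx⟩)
    · exact ⟨x, h, Or.inl rfl⟩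
    · exact ⟨p, hp, Or.inr hx⟩
  · rintro ⟨p, hp, rfl | hx⟩
    · exact Or.inl hp
    · exact Or.inr ⟨p, hp, hx⟩

-- A's truthiness test 'parts & keywords'
lemma pvInter_isEmpty_iff (parts : PySem.Set String) (kws : List String) :
    (PySem.Set.inter parts (PySem.Set.ofList kws)).isEmpty = true ↔ ¬ ∃ x ∈ parts, x ∈ kws := by
  rw [List.isEmpty_iff, List.eq_nil_iff_forall_not_mem]
  constructor
  · rintro h ⟨x, hx, hk⟩
    exact h x (by rw [PySem.Set.mem_inter, PySem.Set.mem_ofList]; exact ⟨hx, hk⟩)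
  · intro h x hx
    rw [PySem.Set.mem_inter, PySem.Set.mem_ofList] at hx
    exact h ⟨x, hx.1, hx.2⟩

-- B's fold = fold of the max-step over the filterMapped indices
lemma pvFoldl_step_filterMap (ts : List String) (acc : Option Int) :
    ts.foldl pvStep acc = (ts.filterMap pvKw.get?).foldl pvMStep acc := by
  induction ts generalizing acc with
  | nil => rfl
  | cons t ts ih =>
    simp only [List.foldl_cons]
    cases h : pvKw.get? t with
    | none => simp [h, pvStep, ih]
    | some i => simp [h, pvStep, pvMStep, ih]

lemma pvFoldl_mstep_some (l : List Int) (a : Int) :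
    l.foldl pvMStep (some a) = some (l.foldl max a) := by
  induction l generalizing a with
  | nil => rfl
  | cons b l ih =>
    simp only [List.foldl_cons, pvMStep]
    by_cases h : a < b
    · rw [if_pos h, ih, max_eq_right h.le]
    · rw [if_neg h, ih, max_eq_left (not_lt.1 h)]

lemma pvFoldl_mstep_none (l : List Int) : l.foldl pvMStep none = l.max? := by
  cases l with
  | nil => rfl
  | cons a l => simp [pvMStep, pvFoldl_mstep_some, List.max?]

-- B in closed form: the max of the matched indices
lemma pvAlt_eq_max (m : String) : module_layer_py_alt m = (pvM (PySem.Str.lower m)).max? := by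
  unfold module_layer_py_alt pvM pvTokens
  rw [← List.foldl_flatMap,
    show (fun (best : Option Int) (tok : String) =>
      match pvKw.get? tok with
      | none => best
      | some i =>
        match best with
        | none => some i
        | some b => if b < i then some i else best) = pvStep from rfl,
    pvFoldl_step_filterMap, pvFoldl_mstep_none]

-- index membership in B's matched list = existence of a token in the layer's keyword list
lemma pvMem_M3 (nl : String) : (3 : Int) ∈ pvM nl ↔ ∃ t ∈ pvTokens nl, t ∈ pvK3 := by
  unfold pvM
  rw [List.mem_filterMap]
  constructor
  · rintro ⟨t, ht, hg⟩
    have H : ∀ p ∈ pvKwList, p.2 = 3 → p.1 ∈ pvK3 := by decide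
    exact ⟨t, ht, H (t, 3) (pvGet_mem t 3 hg) rfl⟩
  · rintro ⟨t, ht, hmem⟩
    have H : ∀ x ∈ pvK3, pvKw.get? x = some 3 := by decide
    exact ⟨t, ht, H t hmem⟩

lemma pvMem_M2 (nl : String) : (2 : Int) ∈ pvM nl ↔ ∃ t ∈ pvTokens nl, t ∈ pvK2 := by
  unfold pvM
  rw [List.mem_filterMap]
  constructor
  · rintro ⟨t, ht, hg⟩
    have H : ∀ p ∈ pvKwList, p.2 = 2 → p.1 ∈ pvK2 := by decide
    exact ⟨t, ht, H (t, 2) (pvGet_mem t 2 hg) rfl⟩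
  · rintro ⟨t, ht, hmem⟩
    have H : ∀ x ∈ pvK2, pvKw.get? x = some 2 := by decide
    exact ⟨t, ht, H t hmem⟩

lemma pvMem_M1 (nl : String) : (1 : Int) ∈ pvM nl ↔ ∃ t ∈ pvTokens nl, t ∈ pvK1 := by
  unfold pvM
  rw [List.mem_filterMap]
  constructor
  · rintro ⟨t, ht, hg⟩
    have H : ∀ p ∈ pvKwList, p.2 = 1 → p.1 ∈ pvK1 := by decide
    exact ⟨t, ht, H (t, 1) (pvGet_mem t 1 hg) rfl⟩
  · rintro ⟨t, ht, hmem⟩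
    have H : ∀ x ∈ pvK1, pvKw.get? x = some 1 := by decide
    exact ⟨t, ht, H t hmem⟩

lemma pvMem_M0 (nl : String) : (0 : Int) ∈ pvM nl ↔ ∃ t ∈ pvTokens nl, t ∈ pvK0 := by
  unfold pvM
  rw [List.mem_filterMap]
  constructor
  · rintro ⟨t, ht, hg⟩
    have H : ∀ p ∈ pvKwList, p.2 = 0 → p.1 ∈ pvK0 := by decide
    exact ⟨t, ht, H (t, 0) (pvGet_mem t 0 hg) rfl⟩
  · rintro ⟨t, ht, hmem⟩
    have H : ∀ x ∈ pvK0, pvKw.get? x = some 0 := by decide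
    exact ⟨t, ht, H t hmem⟩

-- every matched index is one of 0,1,2,3
lemma pvMem_M_bound (nl : String) (i : Int) (h : i ∈ pvM nl) : i = 0 ∨ i = 1 ∨ i = 2 ∨ i = 3 := by
  unfold pvM at h
  rw [List.mem_filterMap] at h
  obtain ⟨t, _, hg⟩ := h
  have H : ∀ p ∈ pvKwList, p.2 = 0 ∨ p.2 = 1 ∨ p.2 = 2 ∨ p.2 = 3 := by decide
  exact H (t, i) (pvGet_mem t i hg)

-- ===== VERDICT (by name: the statement is the Claim_ definition above) =====
theorem module_layer_py_spec : Claim_equal_module_layer_py := by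
  intro m _
  unfold Spec_module_layer_py
  rw [pvAlt_eq_max]
  have hA : module_layer_py m = pvFindLayer (pvParts (PySem.Str.lower m)) pvLayerMap := rfl
  rw [hA]
  set nl := PySem.Str.lower m
  -- translate each layer's test into M-membership
  have key : ∀ (i : Int) (K : List String),
      ((i ∈ pvM nl) ↔ ∃ t ∈ pvTokens nl, t ∈ K) →
      (((PySem.Set.inter (pvParts nl) (PySem.Set.ofList K)).isEmpty = true) ↔ i ∉ pvM nl) := by
    intro i K hK
    rw [pvInter_isEmpty_iff, hK]
    constructor
    · rintro h hi
      obtain ⟨t, ht, hk⟩ := hi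
      exact h ⟨t, (pvMem_parts nl t).mpr ht, hk⟩
    · rintro h ⟨t, ht, hk⟩
      exact h ⟨t, (pvMem_parts nl t).mp ht, hk⟩
  have k3 := key 3 pvK3 (pvMem_M3 nl)
  have k2 := key 2 pvK2 (pvMem_M2 nl)
  have k1 := key 1 pvK1 (pvMem_M1 nl)
  have k0 := key 0 pvK0 (pvMem_M0 nl)
  simp only [pvLayerMap, pvFindLayer]
  by_cases h3 : (3 : Int) ∈ pvM nl
  · rw [if_neg (by rw [k3]; exact not_not_intro h3)]
    refine (List.max?_eq_some_iff.mpr ⟨h3, ?_⟩).symm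
    intro b hb
    rcases pvMem_M_bound nl b hb with rfl | rfl | rfl | rfl <;> omega
  · rw [if_pos (k3.mpr h3)]
    by_cases h2 : (2 : Int) ∈ pvM nl
    · rw [if_neg (by rw [k2]; exact not_not_intro h2)]
      refine (List.max?_eq_some_iff.mpr ⟨h2, ?_⟩).symm
      intro b hb
      rcases pvMem_M_bound nl b hb with rfl | rfl | rfl | rfl <;> first | omega | exact absurd hb h3
    · rw [if_pos (k2.mpr h2)]
      by_cases h1 : (1 : Int) ∈ pvM nl
      · rw [if_neg (by rw [k1]; exact not_not_intro h1)]
        refine (List.max?_eq_some_iff.mpr ⟨h1, ?_⟩).symm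
        intro b hb
        rcases pvMem_M_bound nl b hb with rfl | rfl | rfl | rfl <;>
          first | omega | exact absurd hb h3 | exact absurd hb h2
      · rw [if_pos (k1.mpr h1)]
        by_cases h0 : (0 : Int) ∈ pvM nl
        · rw [if_neg (by rw [k0]; exact not_not_intro h0)]
          refine (List.max?_eq_some_iff.mpr ⟨h0, ?_⟩).symm
          intro b hb
          rcases pvMem_M_bound nl b hb with rfl | rfl | rfl | rfl <;>
            first | omega | exact absurd hb h3 | exact absurd hb h2 | exact absurd hb h1
        · rw [if_pos (k0.mpr h0)]
          have : pvM nl = [] := by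
            rw [List.eq_nil_iff_forall_not_mem]
            intro b hb
            rcases pvMem_M_bound nl b hb with rfl | rfl | rfl | rfl <;>
              first | exact absurd hb h0 | exact absurd hb h1 | exact absurd hb h2 | exact absurd hb h3
          rw [this]
          rfl
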